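-- pv_equiv track=rewrite | github.com/pypi-data/pypi-mirror-390 | packages/sensor-routing/sensor_routing-0.2.0.tar.gz/sensor_routing-0.2.0/sensor_routing/benefit_calculation.py | process_summary_data
-- ===== SOURCE A (Python) =====
-- def process_summary_data(all_data):
--     """Summarize data by calculating the number of one-way and two-way segments."""
--     number_of_one_way_segments = len([segment for segment in all_data if segment['is_oneway'] == 1])
--     number_of_two_way_segments = len([segment for segment in all_data if segment['is_oneway'] == 0])
--
--     return {
--         'number_of_top_segments': len(all_data),
--         'number_of_one_way_segments': number_of_one_way_segments,
--         'number_of_two_way_segments': number_of_two_way_segments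
--     }
-- ===== SOURCE B (Python) =====
-- def process_summary_data(all_data):
--     """Summarize data by calculating the number of one-way and two-way segments."""
--     counts = {}
--     for segment in all_data:
--         v = segment['is_oneway']
--         counts[v] = counts.get(v, 0) + 1
--
--     return {
--         'number_of_top_segments': len(all_data),
--         'number_of_one_way_segments': counts.get(1, 0),
--         'number_of_two_way_segments': counts.get(0, 0)
--     }
-- ===== Notes on version B (the rewrite author's own statement) =====
-- stated objective: idiomatic
-- what changed: Replaces A's two separate filter-and-count scans over all_data with one pass that builds a frequency table of the 'is_oneway' values, followed by O(1) table lookups for the 1 and 0 buckets (values other than 0/1 still land in neither reported bucket, as in A).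
import Mathlib
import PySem

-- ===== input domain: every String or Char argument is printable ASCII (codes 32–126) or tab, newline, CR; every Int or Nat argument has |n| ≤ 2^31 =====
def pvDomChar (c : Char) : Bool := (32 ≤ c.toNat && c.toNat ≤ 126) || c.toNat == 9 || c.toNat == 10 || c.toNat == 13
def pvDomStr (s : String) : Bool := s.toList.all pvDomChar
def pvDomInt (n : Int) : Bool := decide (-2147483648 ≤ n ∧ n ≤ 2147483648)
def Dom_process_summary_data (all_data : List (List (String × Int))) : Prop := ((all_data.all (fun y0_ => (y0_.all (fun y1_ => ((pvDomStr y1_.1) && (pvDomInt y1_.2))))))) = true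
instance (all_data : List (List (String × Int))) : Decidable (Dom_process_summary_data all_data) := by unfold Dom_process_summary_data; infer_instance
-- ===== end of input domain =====

-- B builds one frequency table of the 'is_oneway' values in a single pass and reads the
-- 1/0 buckets from it, instead of A's two separate filter-and-count scans (objective: idiomatic).


-- ===== PORT A =====
-- segment['is_oneway'] raises KeyError when missing; Pre_ excludes that, so the port reads via get?.
def process_summary_data (all_data : List (List (String × Int))) : List (String × Int) :=
  let number_of_one_way_segments : Int :=
    (all_data.filter (fun segment => (PySem.Dict.mk segment).get? "is_oneway" == some 1)).length
  let number_of_two_way_segments : Int :=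
    (all_data.filter (fun segment => (PySem.Dict.mk segment).get? "is_oneway" == some 0)).length
  [("number_of_top_segments", (all_data.length : Int)),
   ("number_of_one_way_segments", number_of_one_way_segments),
   ("number_of_two_way_segments", number_of_two_way_segments)]

-- ===== PORT B =====
-- one-pass frequency table of the 'is_oneway' values, then two lookups.
-- segment['is_oneway'] raises KeyError when missing (excluded by Pre_); ported as getD with default 0.
def process_summary_data_alt (all_data : List (List (String × Int))) : List (String × Int) :=
  let counts : PySem.Dict Int Int :=
    all_data.foldl
      (fun d segment =>
        let v := (PySem.Dict.mk segment).getD "is_oneway" 0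
        d.insert v (d.getD v 0 + 1))
      PySem.Dict.empty
  [("number_of_top_segments", (all_data.length : Int)),
   ("number_of_one_way_segments", counts.getD 1 0),
   ("number_of_two_way_segments", counts.getD 0 0)]

-- ===== PRECONDITION & SPEC =====
-- Pre_ excludes inputs where some segment lacks the key 'is_oneway': there both Pythons raise KeyError.
def Pre_process_summary_data (all_data : List (List (String × Int))) : Prop :=
  ∀ segment ∈ all_data, (PySem.Dict.mk segment).contains "is_oneway" = true
instance (all_data : List (List (String × Int))) : Decidable (Pre_process_summary_data all_data) := by unfold Pre_process_summary_data; infer_instance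
def pvWitness_process_summary_data : (List (List (String × Int))) := [[("is_oneway", 1)], [("is_oneway", 0), ("name", 7)]]

def Spec_process_summary_data (all_data : List (List (String × Int))) (out : List (String × Int)) : Prop := out = process_summary_data_alt all_data
instance (all_data : List (List (String × Int))) (out : List (String × Int)) : Decidable (Spec_process_summary_data all_data out) := by unfold Spec_process_summary_data; infer_instance

-- ===== CLAIM (what is proved, stated in full; the proofs are below) =====
def Claim_equal_process_summary_data : Prop := ∀ (all_data : List (List (String × Int))), Dom_process_summary_data all_data → Pre_process_summary_data all_data → Spec_process_summary_data all_data (process_summary_data all_data)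

-- ===== LEMMAS AND PROOFS =====

-- B's single-pass loop over segments is the counting loop over the mapped values.
theorem foldl_step_eq_foldl_map (l : List (List (String × Int))) (d : PySem.Dict Int Int) :
    (l.foldl
      (fun d segment =>
        let w := (PySem.Dict.mk segment).getD "is_oneway" 0
        d.insert w (d.getD w 0 + 1)) d)
    = ((l.map (fun segment => (PySem.Dict.mk segment).getD "is_oneway" 0)).foldl
        (fun d w => d.insert w (d.getD w 0 + 1)) d) := by
  induction l generalizing d with
  | nil => rfl
  | cons a t ih => simp [List.foldl_cons, ih]

-- A's filter-length for bucket v equals the count of v among the looked-up values.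
theorem filter_len_eq_count (l : List (List (String × Int)))
    (h : ∀ segment ∈ l, ((PySem.Dict.mk segment).get? "is_oneway").isSome) (v : Int) :
    ((l.filter (fun segment => (PySem.Dict.mk segment).get? "is_oneway" == some v)).length : Int)
      = ((l.map (fun segment => (PySem.Dict.mk segment).getD "is_oneway" 0)).count v : Int) := by
  induction l with
  | nil => simp
  | cons a t ih =>
    have ha : ((PySem.Dict.mk a).get? "is_oneway").isSome := h a (by simp)
    obtain ⟨x, hx⟩ := Option.isSome_iff_exists.mp ha
    have ht := ih (fun s hs => h s (by simp [hs]))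
    have hgd : (PySem.Dict.mk a).getD "is_oneway" 0 = x := by
      simp [PySem.Dict.getD_eq_get?_getD, hx]
    by_cases hv : x = v
    · simp [hx, hgd, hv, ht]
    · simp [List.count_cons, hx, hgd, hv, ht]

theorem process_summary_data_spec : Claim_equal_process_summary_data := by
  intro all_data _ hpre
  unfold Spec_process_summary_data process_summary_data process_summary_data_alt
  have hpre' : ∀ segment ∈ all_data, ((PySem.Dict.mk segment).get? "is_oneway").isSome := by
    intro s hs
    have := hpre s hs
    rwa [PySem.Dict.contains_eq_isSome_get?] at this
  have hB : ∀ v : Int,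
      (all_data.foldl
        (fun d segment =>
          let w := (PySem.Dict.mk segment).getD "is_oneway" 0
          d.insert w (d.getD w 0 + 1)) PySem.Dict.empty).getD v 0
        = ((all_data.map (fun segment => (PySem.Dict.mk segment).getD "is_oneway" 0)).count v : Int) := by
    intro v
    rw [foldl_step_eq_foldl_map all_data PySem.Dict.empty,
        PySem.Dict.getD_foldl_insert_add_one]
    simp [PySem.Dict.getD_empty]
  simp only [hB, filter_len_eq_count all_data hpre']

-- ===== VERDICT (by name: the statement is the Claim_ definition above) =====
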